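-- pv_equiv track=rewrite | github.com/midnightnow/alpha | PMG_LATTICE/bite_point_test.py | analyze_primes
-- ===== SOURCE A (Python) =====
-- def is_prime(n):
--     if n < 2: return False
--     for i in range(2, int(n**0.5) + 1):
--         if n % i == 0: return False
--     return True
--
-- def analyze_primes(count=1000):
--     primes = []
--     i = 2
--     while len(primes) < count:
--         if is_prime(i):
--             primes.append(i)
--         i += 1
--
--     residues = [p % 24 for p in primes]
--     # Check interference with 7-cycle digits: 1, 4, 2, 8, 5, 7
--     cycle_7 = [1, 4, 2, 8, 5, 7]
--     match_count = sum(1 for r in residues if r % 9 in cycle_7)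
--     return residues, match_count
-- ===== SOURCE B (Python) =====
-- def analyze_primes(count=1000):
--     # Trial division by the primes found so far (only up to sqrt n), with a
--     # fused single pass computing residues and the cycle-match count.
--     primes = []
--     n = 2
--     while len(primes) < count:
--         composite = False
--         for p in primes:
--             if p * p > n:
--                 break
--             if n % p == 0:
--                 composite = True
--                 break
--         if not composite:
--             primes.append(n)
--         n += 1
--     residues = []
--     match_count = 0
--     for p in primes:
--         r = p % 24
--         residues.append(r)
--         if r % 9 in (1, 4, 2, 8, 5, 7):
--             match_count += 1
--     return residues, match_count
-- ===== Notes on version B (the rewrite author's own statement) =====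
-- stated objective: faster
-- what changed: B tests each candidate by dividing only by the primes already found (stopping once p*p > n) instead of by every integer up to sqrt(n), and computes residues and the cycle-match count in one fused pass instead of a list comprehension plus a generator sum.
import Mathlib
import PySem

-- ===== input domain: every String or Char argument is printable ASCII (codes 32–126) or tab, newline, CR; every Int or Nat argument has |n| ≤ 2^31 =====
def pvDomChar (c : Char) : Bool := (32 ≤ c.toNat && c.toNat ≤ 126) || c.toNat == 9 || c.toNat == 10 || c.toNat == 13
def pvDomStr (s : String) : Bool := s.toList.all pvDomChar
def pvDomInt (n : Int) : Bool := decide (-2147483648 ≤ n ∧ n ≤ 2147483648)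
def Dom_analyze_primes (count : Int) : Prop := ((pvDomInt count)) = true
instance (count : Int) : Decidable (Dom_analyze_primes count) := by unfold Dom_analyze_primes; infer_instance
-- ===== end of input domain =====

-- B replaces A's per-candidate trial division by all integers up to sqrt(n) with trial
-- division by the previously found primes (stopping at p*p > n) and fuses the residue
-- and match-count passes into one loop; measured faster by a constant factor.


-- ===== PORT A =====
-- Helpers cited by the loops' termination proofs (Euclid: a prime ≥ i always exists).
theorem pvNextPrimeEx (i : Nat) : ∃ p, i ≤ p ∧ Nat.Prime p := by
  obtain ⟨p, hle, hp⟩ := Nat.exists_infinite_primes i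
  exact ⟨p, hle, hp⟩

def pvNextPrime (i : Nat) : Nat := Nat.find (pvNextPrimeEx i)

theorem pvGapLt {i : Nat} (h : ¬ Nat.Prime i) :
    pvNextPrime (i + 1) - (i + 1) < pvNextPrime i - i := by
  have hspec : i ≤ pvNextPrime i ∧ Nat.Prime (pvNextPrime i) := Nat.find_spec (pvNextPrimeEx i)
  have hne : pvNextPrime i ≠ i := fun he => h (he ▸ hspec.2)
  have hmin : pvNextPrime (i + 1) ≤ pvNextPrime i :=
    Nat.find_min' (pvNextPrimeEx (i + 1)) ⟨by omega, hspec.2⟩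
  have hsp2 : i + 1 ≤ pvNextPrime (i + 1) :=
    (Nat.find_spec (pvNextPrimeEx (i + 1))).1
  omega

-- is_prime(n): 'int(n**0.5)' ported as Nat.sqrt (exact on the magnitudes drawn from Dom);
-- range(2, r+1) is List.range' 2 (r+1-2); the loop counter stays a nonnegative int (Nat).
def isPrimeA (n : Nat) : Bool :=
  if n < 2 then false
  else (List.range' 2 (Nat.sqrt n + 1 - 2)).all (fun i => !(n % i == 0))

theorem isPrimeA_eq (n : Nat) : isPrimeA n = decide (Nat.Prime n) := by
  unfold isPrimeA
  by_cases h : n < 2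
  · rw [if_pos h, eq_comm, decide_eq_false_iff_not]
    exact fun hp => absurd hp.two_le (by omega)
  · have h2 : 2 ≤ n := by omega
    have hs : 1 ≤ Nat.sqrt n := Nat.le_sqrt.2 (by omega)
    simp only [h, if_false]
    rw [Bool.eq_iff_iff, List.all_eq_true, decide_eq_true_iff, Nat.prime_def_le_sqrt]
    constructor
    · intro hall
      refine ⟨h2, fun m hm2 hmle hdvd => ?_⟩
      have : m ∈ List.range' 2 (Nat.sqrt n + 1 - 2) := by
        rw [List.mem_range'_1]; omega
      have hh := hall m this
      simp only [Bool.not_eq_eq_eq_not, Bool.not_true, beq_eq_false_iff_ne] at hh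
      exact hh ((Nat.dvd_iff_mod_eq_zero).1 hdvd)
    · rintro ⟨-, hnd⟩ m hm
      rw [List.mem_range'_1] at hm
      simp only [Bool.not_eq_eq_eq_not, Bool.not_true, beq_eq_false_iff_ne]
      intro hmod
      exact hnd m hm.1 (by omega) (Nat.dvd_of_mod_eq_zero hmod)

theorem pvLexL {a1 b1 a2 b2 : Nat} (h : a1 < a2) :
    Prod.Lex (· < ·) (· < ·) (a1, b1) (a2, b2) := Prod.Lex.left _ _ h

theorem pvLexR {a b1 b2 : Nat} (h : b1 < b2) :
    Prod.Lex (· < ·) (· < ·) (a, b1) (a, b2) := Prod.Lex.right _ h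

theorem pvLenLt {count : Int} {l : List Int} {x : Int}
    (h : (l.length : Int) < count) :
    (count - ((l ++ [x]).length : Int)).toNat < (count - (l.length : Int)).toNat := by
  simp only [List.length_append, List.length_cons, List.length_nil]
  omega

theorem pvNotPrimeA {i : Nat} (h2 : ¬ isPrimeA i = true) : ¬ Nat.Prime i := by
  simpa [isPrimeA_eq] using h2

-- while len(primes) < count: if is_prime(i): primes.append(i); i += 1
def loopA (count : Int) (primes : List Int) (i : Nat) : List Int :=
  if h1 : (primes.length : Int) < count then
    if h2 : isPrimeA i = true then loopA count (primes ++ [(i : Int)]) (i + 1)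
    else loopA count primes (i + 1)
  else primes
termination_by ((count - primes.length).toNat, pvNextPrime i - i)
decreasing_by
  · exact pvLexL (pvLenLt h1)
  · exact pvLexR (pvGapLt (pvNotPrimeA h2))

def analyze_primes (count : Int) : List Int × Int :=
  let primes := loopA count [] 2
  let residues := primes.map (fun p => PySem.Int.mod p 24)
  let match_count := residues.foldl
    (fun s r => if ([1, 4, 2, 8, 5, 7] : List Int).contains (PySem.Int.mod r 9) then s + 1 else s)
    (0 : Int)
  (residues, match_count)

-- ===== PORT B =====
-- for p in primes: if p*p > n: break / if n % p == 0: composite = True; break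
def isCompositeB (n : Int) : List Int → Bool
  | [] => false
  | p :: ps =>
    if p * p > n then false
    else if PySem.Int.mod n p == 0 then true
    else isCompositeB n ps

theorem isCompositeB_exists {n : Int} {ps : List Int} (h : isCompositeB n ps = true) :
    ∃ p ∈ ps, PySem.Int.mod n p = 0 := by
  induction ps with
  | nil => simp [isCompositeB] at h
  | cons q qs ih =>
    rw [isCompositeB] at h
    by_cases hq : q * q > n
    · rw [if_pos hq] at h; exact absurd h (by simp)
    · rw [if_neg hq] at h
      by_cases hm : PySem.Int.mod n q = 0
      · exact ⟨q, by simp, hm⟩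
      · rw [if_neg (by simp [hm])] at h
        obtain ⟨p, hp, hmp⟩ := ih h
        exact ⟨p, by simp [hp], hmp⟩

-- a proper divisor found by isCompositeB refutes primality (used for termination of loopB)
theorem pvNotPrime_of_div {n : Nat} {p : Int} (h2 : 2 ≤ p) (hlt : p < (n : Int))
    (hm : PySem.Int.mod (n : Int) p = 0) : ¬ Nat.Prime n := by
  intro hp
  have hdvd : p ∣ (n : Int) := (PySem.Int.mod_eq_zero_iff_dvd _ _).1 hm
  have hpn : p.toNat ∣ n := by
    have : ((p.toNat : Int)) ∣ (n : Int) := by rwa [Int.toNat_of_nonneg (by omega)]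
    exact_mod_cast this
  rcases (Nat.Prime.eq_one_or_self_of_dvd hp _ hpn) with h | h <;> omega

def pvInv (primes : List Int) (n : Nat) : Prop :=
  2 ≤ n ∧ ∀ a ∈ primes, 2 ≤ a ∧ a < (n : Int)

theorem pvInvAppend {primes : List Int} {n : Nat} (hinv : pvInv primes n) :
    pvInv (primes ++ [(n : Int)]) (n + 1) := by
  obtain ⟨h1, h2⟩ := hinv
  refine ⟨by omega, fun a ha => ?_⟩
  rcases List.mem_append.1 ha with ha | ha
  · have := h2 a ha; push_cast; constructor <;> omega
  · simp only [List.mem_singleton] at ha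
    subst ha; push_cast
    exact ⟨by exact_mod_cast h1, by omega⟩

theorem pvInvSkip {primes : List Int} {n : Nat} (hinv : pvInv primes n) :
    pvInv primes (n + 1) := by
  obtain ⟨h1, h2⟩ := hinv
  refine ⟨by omega, fun a ha => ?_⟩
  have := h2 a ha; push_cast; constructor <;> omega

theorem pvInvInit : pvInv [] 2 := by simp [pvInv]

theorem pvNotPrimeB {primes : List Int} {n : Nat} (hinv : pvInv primes n)
    (h2 : ¬ isCompositeB (n : Int) primes = false) : ¬ Nat.Prime n := by
  obtain ⟨p, hp, hm⟩ := isCompositeB_exists (by simpa using h2)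
  have := hinv.2 p hp
  exact pvNotPrime_of_div this.1 this.2 hm

-- while len(primes) < count: test n against the stored primes, append if no divisor, n += 1.
-- hinv only records that the loop state is the reachable one (n ≥ 2, stored values in [2, n));
-- it makes the recursion total and does not alter the computation.
def loopB (count : Int) (primes : List Int) (n : Nat)
    (hinv : pvInv primes n) : List Int :=
  if h1 : (primes.length : Int) < count then
    if h2 : isCompositeB (n : Int) primes = false then
      loopB count (primes ++ [(n : Int)]) (n + 1) (pvInvAppend hinv)
    else
      loopB count primes (n + 1) (pvInvSkip hinv)
  else primes
termination_by ((count - primes.length).toNat, pvNextPrime n - n)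
decreasing_by
  · exact pvLexL (pvLenLt h1)
  · exact pvLexR (pvGapLt (pvNotPrimeB hinv h2))

def analyze_primes_alt (count : Int) : List Int × Int :=
  let primes := loopB count [] 2 pvInvInit
  primes.foldl
    (fun st p =>
      let r := PySem.Int.mod p 24
      (st.1 ++ [r],
       if ([1, 4, 2, 8, 5, 7] : List Int).contains (PySem.Int.mod r 9) then st.2 + 1 else st.2))
    ([], 0)

-- ===== PRECONDITION & SPEC =====
def Spec_analyze_primes (count : Int) (out : List Int × Int) : Prop := out = analyze_primes_alt count
instance (count : Int) (out : List Int × Int) : Decidable (Spec_analyze_primes count out) := by unfold Spec_analyze_primes; infer_instance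

-- ===== CLAIM (what is proved, stated in full; the proofs are below) =====
def Claim_equal_analyze_primes : Prop := ∀ (count : Int), Dom_analyze_primes count → Spec_analyze_primes count (analyze_primes count)

-- ===== LEMMAS AND PROOFS =====

-- the primes below i, ascending, as Ints: the reachable loop state
def primesUpto (i : Nat) : List Int :=
  List.map (fun m : Nat => (m : Int)) ((List.range i).filter (fun m => decide (Nat.Prime m)))

theorem mem_primesUpto {i : Nat} {a : Int} (h : a ∈ primesUpto i) :
    ∃ m : Nat, a = (m : Int) ∧ m < i ∧ Nat.Prime m := by
  unfold primesUpto at h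
  rw [List.mem_map] at h
  obtain ⟨m, hm, he⟩ := h
  rw [List.mem_filter, List.mem_range] at hm
  exact ⟨m, he.symm, hm.1, by simpa using hm.2⟩

theorem primesUpto_sorted (i : Nat) : (primesUpto i).Pairwise (· < ·) := by
  unfold primesUpto
  refine List.pairwise_map.2 ?_
  exact ((List.pairwise_lt_range).filter _).imp (fun h => by exact_mod_cast h)

theorem primesUpto_succ_prime {i : Nat} (h : Nat.Prime i) :
    primesUpto (i + 1) = primesUpto i ++ [(i : Int)] := by
  simp [primesUpto, List.range_succ, h]

theorem primesUpto_succ_not {i : Nat} (h : ¬ Nat.Prime i) :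
    primesUpto (i + 1) = primesUpto i := by
  simp [primesUpto, List.range_succ, h]

theorem isCompositeB_false_of_no_div {n : Int} {ps : List Int}
    (h : ∀ p ∈ ps, PySem.Int.mod n p ≠ 0) : isCompositeB n ps = false := by
  induction ps with
  | nil => rfl
  | cons q qs ih =>
    rw [isCompositeB]
    split_ifs with hq hm
    · rfl
    · exact absurd (by simpa using hm) (h q (by simp))
    · exact ih fun p hp => h p (by simp [hp])

theorem isCompositeB_true_of_mem {n : Int} {ps : List Int}
    (hsort : ps.Pairwise (· < ·)) (hpos : ∀ p ∈ ps, 2 ≤ p)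
    {p : Int} (hmem : p ∈ ps) (hsq : p * p ≤ n) (hm : PySem.Int.mod n p = 0) :
    isCompositeB n ps = true := by
  induction ps with
  | nil => simp at hmem
  | cons q qs ih =>
    rw [isCompositeB]
    have hq2 : 2 ≤ q := hpos q (by simp)
    have hqle : q ≤ p := by
      rcases List.mem_cons.1 hmem with rfl | hmem
      · exact le_refl _
      · exact le_of_lt ((List.pairwise_cons.1 hsort).1 p hmem)
    have hqq : q * q ≤ n := le_trans (by nlinarith [hpos p hmem]) hsq
    rw [if_neg (by omega)]
    split_ifs with hmod
    · rfl
    · have hpq : p ≠ q := fun he => hmod (by simpa [he] using hm)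
      exact ih (List.pairwise_cons.1 hsort).2 (fun a ha => hpos a (by simp [ha]))
        (by rcases List.mem_cons.1 hmem with rfl | hmem; exact absurd rfl hpq; exact hmem)

-- given the reachable state, B's test agrees with A's
theorem test_eq {i : Nat} (hi : 2 ≤ i) :
    isCompositeB (i : Int) (primesUpto i) = !(isPrimeA i) := by
  rw [isPrimeA_eq]
  by_cases hp : Nat.Prime i
  · simp only [hp, decide_true, Bool.not_true]
    apply isCompositeB_false_of_no_div
    intro p hmem hm
    obtain ⟨m, rfl, hlt, hmp⟩ := mem_primesUpto hmem
    have hdvd : (m : Int) ∣ (i : Int) := (PySem.Int.mod_eq_zero_iff_dvd _ _).1 hm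
    have : m ∣ i := by exact_mod_cast hdvd
    rcases (Nat.Prime.eq_one_or_self_of_dvd hp _ this) with h | h
    · exact absurd h (by have := hmp.two_le; omega)
    · omega
  · simp only [hp, decide_false, Bool.not_false]
    set m := Nat.minFac i with hm
    have hmp : Nat.Prime m := Nat.minFac_prime (by omega)
    have hdvd : m ∣ i := Nat.minFac_dvd i
    have hsq : m * m ≤ i := by
      have := Nat.minFac_sq_le_self (by omega) hp
      nlinarith [this, sq_nonneg (m : Int)]
    have hlt : m < i := by
      have hle : m ≤ i := Nat.le_of_dvd (by omega) hdvd
      rcases eq_or_lt_of_le hle with he | h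
      · exact absurd (Nat.prime_def_minFac.2 ⟨hi, by rw [← hm, he]⟩) hp
      · exact h
    apply isCompositeB_true_of_mem (primesUpto_sorted i)
      (fun a ha => by obtain ⟨k, rfl, -, hk⟩ := mem_primesUpto ha; exact_mod_cast hk.two_le)
      (p := (m : Int))
    · unfold primesUpto
      simp only [List.mem_map, List.mem_filter, List.mem_range, decide_eq_true_iff]
      exact ⟨m, ⟨hlt, hmp⟩, rfl⟩
    · exact_mod_cast hsq
    · exact (PySem.Int.mod_eq_zero_iff_dvd _ _).2 (by exact_mod_cast hdvd)

theorem loop_eq (count : Int) (primes : List Int) (i : Nat) :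
    2 ≤ i → primes = primesUpto i →
      ∀ hinv, loopB count primes i hinv = loopA count primes i := by
  fun_induction loopA count primes i with
  | case1 primes i h1 h2 ih =>
    intro hi hpr hinv
    have hprime : Nat.Prime i := by simpa [isPrimeA_eq] using h2
    rw [loopB, dif_pos h1, dif_pos (by rw [hpr, test_eq hi]; simp [h2])]
    exact ih (by omega) (by rw [hpr, primesUpto_succ_prime hprime]) _
  | case2 primes i h1 h2 ih =>
    intro hi hpr hinv
    have hnp : ¬ Nat.Prime i := by simpa [isPrimeA_eq] using h2
    rw [loopB, dif_pos h1, dif_neg (by rw [hpr, test_eq hi]; simp [h2])]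
    exact ih (by omega) (by rw [hpr, primesUpto_succ_not hnp]) _
  | case3 primes i h1 =>
    intro _ _ hinv
    rw [loopB, dif_neg h1]

theorem fold_fuse (ps : List Int) : ∀ (res : List Int) (c : Int),
    (ps.foldl
      (fun st p =>
        let r := PySem.Int.mod p 24
        (st.1 ++ [r],
         if ([1, 4, 2, 8, 5, 7] : List Int).contains (PySem.Int.mod r 9) then st.2 + 1 else st.2))
      (res, c))
    = (res ++ ps.map (fun p => PySem.Int.mod p 24),
       (ps.map (fun p => PySem.Int.mod p 24)).foldl
         (fun s r => if ([1, 4, 2, 8, 5, 7] : List Int).contains (PySem.Int.mod r 9) then s + 1 else s)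
         c) := by
  induction ps with
  | nil => simp
  | cons q qs ih =>
    intro res c
    simp only [List.foldl_cons, List.map_cons, ih]
    simp

theorem primesUpto_two : primesUpto 2 = [] := by decide

-- ===== VERDICT (by name: the statement is the Claim_ definition above) =====
theorem analyze_primes_spec : Claim_equal_analyze_primes := by
  intro count _
  unfold Spec_analyze_primes analyze_primes analyze_primes_alt
  rw [loop_eq count [] 2 (by norm_num) (by rw [primesUpto_two]) _]
  rw [fold_fuse]
  simp
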